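-- pv_equiv track=rewrite | github.com/JackG256/JFA-Sim | runLogicNDET.py | findNextSymbolPosition
-- ===== SOURCE A (Python) =====
-- def findNextSymbolPosition(currentReadSymbol, inputString, inputDict):
--     """
--     Find the index position of a given symbol in a string.
--
--     :param currentReadSymbol: The symbol to search for in the input string.
--     :param inputString: The string in which to search for the symbol.
--     :param inputDict: A dictionary containing the number of occurrences of each symbol in the input string.
--     :return: A tuple containing the modified string, the position of the next occurrence of the symbol, and the updated
--              dictionary.
--     """
--
--     # Variables declaration
--     outputString = ""
--     symbolPosition = 0
--     readSymbolIndex = -1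
--     symbolReached = False
--
--     # Go through all symbols in input string
--     for symbol in inputString:
--         # If symbol is empty, write to output and continue
--         if symbol == "_":
--             outputString += "_"
--             symbolPosition += 1
--
--         # If symbol matches current symbol for first time, replace by empty, save index, flip flag and continue
--         elif symbol == currentReadSymbol and not symbolReached:
--             symbolReached = True
--             outputString += "_"
--             readSymbolIndex = symbolPosition
--             continue
--
--         # Otherwise write to output and continue
--         else:
--             outputString += symbol
--             symbolPosition += 1
--
--     # Check if value in dictionary and update
--     if inputDict[currentReadSymbol] > 1:
--         inputDict[currentReadSymbol] -= 1
--     else: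
--         inputDict[currentReadSymbol] = 0
--
--     return outputString, readSymbolIndex, inputDict
-- ===== SOURCE B (Python) =====
-- def findNextSymbolPosition(currentReadSymbol, inputString, inputDict):
--     # Index via str.find instead of a manual scan; the original never matches
--     # "_" (its underscore guard wins) and only matches single characters.
--     if len(currentReadSymbol) == 1 and currentReadSymbol != "_":
--         readSymbolIndex = inputString.find(currentReadSymbol)
--     else:
--         readSymbolIndex = -1
--
--     if readSymbolIndex == -1:
--         outputString = inputString
--     else:
--         outputString = inputString[:readSymbolIndex] + "_" + inputString[readSymbolIndex + 1:]
--
--     # Same in-place dictionary update as the original (same KeyError behaviour).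
--     if inputDict[currentReadSymbol] > 1:
--         inputDict[currentReadSymbol] -= 1
--     else:
--         inputDict[currentReadSymbol] = 0
--
--     return outputString, readSymbolIndex, inputDict
-- ===== Notes on version B (the rewrite author's own statement) =====
-- stated objective: idiomatic
-- what changed: Replaces the character-by-character accumulator loop (string concatenation, position counter, matched flag) with str.find plus one slice splice; the dict update is kept verbatim.
import Mathlib
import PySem

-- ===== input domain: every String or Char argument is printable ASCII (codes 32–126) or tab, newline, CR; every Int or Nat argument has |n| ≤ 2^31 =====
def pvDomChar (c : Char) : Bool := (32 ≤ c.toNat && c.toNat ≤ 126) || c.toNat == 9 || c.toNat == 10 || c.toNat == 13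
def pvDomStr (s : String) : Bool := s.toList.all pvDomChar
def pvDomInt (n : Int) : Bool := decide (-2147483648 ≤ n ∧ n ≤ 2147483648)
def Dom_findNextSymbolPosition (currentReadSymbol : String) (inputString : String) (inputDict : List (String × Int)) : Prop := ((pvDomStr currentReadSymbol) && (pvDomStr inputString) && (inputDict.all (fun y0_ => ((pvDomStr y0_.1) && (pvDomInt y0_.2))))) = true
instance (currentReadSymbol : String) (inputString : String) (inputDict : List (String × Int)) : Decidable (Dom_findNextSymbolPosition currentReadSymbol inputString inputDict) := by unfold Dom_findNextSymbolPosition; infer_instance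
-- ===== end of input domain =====

-- B computes the replacement index with str.find and one slice splice instead of A's
-- accumulator loop; the dict argument is mutated in place by BOTH Pythons identically
-- (the equivalence proved is about the returned triple).


-- ===== PORT A =====
-- loop body of A's 'for symbol in inputString': state (outputString, symbolPosition, readSymbolIndex, symbolReached)
def pvStepA (currentReadSymbol : String) (st : List Char × Int × Int × Bool) (sym : Char) : List Char × Int × Int × Bool :=
  let (outputString, symbolPosition, readSymbolIndex, symbolReached) := st
  if sym == '_' then
    (outputString ++ ['_'], symbolPosition + 1, readSymbolIndex, symbolReached)
  else if [sym] == currentReadSymbol.toList && !symbolReached then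
    (outputString ++ ['_'], symbolPosition, symbolPosition, true)
  else
    (outputString ++ [sym], symbolPosition + 1, readSymbolIndex, symbolReached)

-- dict step of A: 'if inputDict[c] > 1: inputDict[c] -= 1 else: inputDict[c] = 0' (KeyError when c absent → outside Pre_)
def pvDictStepA (currentReadSymbol : String) (inputDict : List (String × Int)) : List (String × Int) :=
  let d := PySem.Dict.ofList inputDict
  match d.get? currentReadSymbol with
  | some v => if v > 1 then (d.insert currentReadSymbol (v - 1)).items else (d.insert currentReadSymbol 0).items
  | none => inputDict  -- KeyError in Python; excluded by Pre_

def findNextSymbolPosition (currentReadSymbol : String) (inputString : String) (inputDict : List (String × Int)) : String × Int × (List (String × Int)) :=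
  let st := inputString.toList.foldl (pvStepA currentReadSymbol) ([], 0, -1, false)
  (String.ofList st.1, st.2.2.1, pvDictStepA currentReadSymbol inputDict)

-- ===== PORT B =====
-- dict step of B (identical Python code to A's, kept verbatim in Source B)
def pvDictStepB (currentReadSymbol : String) (inputDict : List (String × Int)) : List (String × Int) :=
  let d := PySem.Dict.ofList inputDict
  match d.get? currentReadSymbol with
  | some v => if v > 1 then (d.insert currentReadSymbol (v - 1)).items else (d.insert currentReadSymbol 0).items
  | none => inputDict  -- KeyError in Python; excluded by Pre_

def findNextSymbolPosition_alt (currentReadSymbol : String) (inputString : String) (inputDict : List (String × Int)) : String × Int × (List (String × Int)) :=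
  let readSymbolIndex : Int :=
    if PySem.Str.len currentReadSymbol == 1 && currentReadSymbol != "_" then
      PySem.Str.find inputString currentReadSymbol
    else -1
  let outputString : String :=
    if readSymbolIndex == -1 then inputString
    else String.ofList (PySem.List.slice inputString.toList none (some readSymbolIndex)
           ++ '_' :: PySem.List.slice inputString.toList (some (readSymbolIndex + 1)) none)
  (outputString, readSymbolIndex, pvDictStepB currentReadSymbol inputDict)

-- ===== PRECONDITION & SPEC =====
-- Pre_ excludes exactly the inputs on which A raises KeyError: currentReadSymbol absent from inputDict.
def Pre_findNextSymbolPosition (currentReadSymbol : String) (inputString : String) (inputDict : List (String × Int)) : Prop :=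
  currentReadSymbol ∈ inputDict.map Prod.fst
instance (currentReadSymbol : String) (inputString : String) (inputDict : List (String × Int)) : Decidable (Pre_findNextSymbolPosition currentReadSymbol inputString inputDict) := by unfold Pre_findNextSymbolPosition; infer_instance
def pvWitness_findNextSymbolPosition : String × String × (List (String × Int)) := ("a", "bab", [("a", 2), ("b", 1)])

def Spec_findNextSymbolPosition (currentReadSymbol : String) (inputString : String) (inputDict : List (String × Int)) (out : String × Int × (List (String × Int))) : Prop := out = findNextSymbolPosition_alt currentReadSymbol inputString inputDict
instance (currentReadSymbol : String) (inputString : String) (inputDict : List (String × Int)) (out : String × Int × (List (String × Int))) : Decidable (Spec_findNextSymbolPosition currentReadSymbol inputString inputDict out) := by unfold Spec_findNextSymbolPosition; infer_instance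

-- ===== CLAIM (what is proved, stated in full; the proofs are below) =====
def Claim_equal_findNextSymbolPosition : Prop := ∀ (currentReadSymbol : String) (inputString : String) (inputDict : List (String × Int)), Dom_findNextSymbolPosition currentReadSymbol inputString inputDict → Pre_findNextSymbolPosition currentReadSymbol inputString inputDict → Spec_findNextSymbolPosition currentReadSymbol inputString inputDict (findNextSymbolPosition currentReadSymbol inputString inputDict)

-- ===== LEMMAS AND PROOFS =====

-- once the flag is set, A's loop copies the rest of the string verbatim
lemma pv_stepA_reached (c : String) (l : List Char) : ∀ (out : List Char) (pos idx : Int),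
    l.foldl (pvStepA c) (out, pos, idx, true) = (out ++ l, pos + l.length, idx, true) := by
  induction l with
  | nil => simp
  | cons x t ih =>
    intro out pos idx
    by_cases hx : x = '_'
    · subst hx
      simp [List.foldl_cons, pvStepA, ih]
      omega
    · simp [List.foldl_cons, pvStepA, hx, ih]
      omega

-- if no character of l can fire A's match branch, the loop copies l verbatim
lemma pv_stepA_nohit (c : String) (l : List Char) (h : ∀ sym ∈ l, sym = '_' ∨ [sym] ≠ c.toList) :
    ∀ (out : List Char) (pos : Int),
    l.foldl (pvStepA c) (out, pos, -1, false) = (out ++ l, pos + l.length, -1, false) := by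
  induction l with
  | nil => simp
  | cons x t ih =>
    intro out pos
    have ht : ∀ sym ∈ t, sym = '_' ∨ [sym] ≠ c.toList := fun sym hs => h sym (List.mem_cons_of_mem _ hs)
    by_cases hx : x = '_'
    · subst hx
      simp [List.foldl_cons, pvStepA, ih ht]
      omega
    · have hne : [x] ≠ c.toList := (h x (List.mem_cons_self)).resolve_left hx
      simp [List.foldl_cons, pvStepA, hx, hne, ih ht]
      omega

-- A's loop, characterised: first occurrence of ch (the single non-underscore char of c) replaced by '_'
lemma pv_stepA_main (c : String) (ch : Char) (hc : c.toList = [ch]) (hch : ch ≠ '_') (l : List Char) :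
    ∀ (out : List Char) (pos : Int),
    l.foldl (pvStepA c) (out, pos, -1, false) =
      if ch ∈ l then
        (out ++ l.take (l.idxOf ch) ++ '_' :: l.drop (l.idxOf ch + 1), pos + l.length - 1,
          pos + l.idxOf ch, true)
      else (out ++ l, pos + l.length, -1, false) := by
  induction l with
  | nil => simp
  | cons x t ih =>
    intro out pos
    by_cases hx : x = ch
    · subst hx
      have h1 : (x == '_') = false := by simp [hch]
      have h2 : ([x] == c.toList && !false) = true := by simp [hc]
      simp only [List.foldl_cons, pvStepA, h1, h2, Bool.false_eq_true, if_false, if_true]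
      rw [pv_stepA_reached]
      simp [List.idxOf_cons_self, Prod.ext_iff]; omega
    · have hxne : ¬(x = ch) := hx
      have hmem : (ch ∈ x :: t) = (ch ∈ t) := by simp [Ne.symm hx]
      have hidx : (x :: t).idxOf ch = t.idxOf ch + 1 := List.idxOf_cons_ne _ hx
      by_cases hx_ : x = '_'
      · subst hx_
        simp only [List.foldl_cons, pvStepA, if_pos (by simp : ('_' == '_') = true)]
        rw [ih]
        by_cases hm : ch ∈ t
        · simp [hm, hmem, hidx, List.take_succ_cons, List.drop_succ_cons, Prod.ext_iff]; omega
        · simp [hm, hmem, Prod.ext_iff]; omega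
      · have h1 : (x == '_') = false := by simp [hx_]
        have h2 : ([x] == c.toList && !false) = false := by simp [hc, hx]
        simp only [List.foldl_cons, pvStepA, h1, h2, Bool.false_eq_true, if_false]
        rw [ih]
        by_cases hm : ch ∈ t
        · simp [hm, hmem, hidx, List.take_succ_cons, List.drop_succ_cons, Prod.ext_iff]; omega
        · simp [hm, hmem, Prod.ext_iff]; omega

-- a singleton list is a prefix iff it is the head
lemma pv_singleton_prefix (ch : Char) (t : List Char) : [ch] <+: t ↔ t[0]? = some ch := by
  cases t with
  | nil => simp
  | cons x t' => simp [List.cons_prefix_cons, eq_comm]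

-- idxOf is at most any index holding the element
lemma pv_idxOf_le (ch : Char) : ∀ (l : List Char) (n : Nat), l[n]? = some ch → l.idxOf ch ≤ n := by
  intro l
  induction l with
  | nil => simp
  | cons x t ih =>
    intro n hn
    by_cases hx : x = ch
    · simp [hx, List.idxOf_cons_self]
    · cases n with
      | zero => simp at hn; exact absurd hn hx
      | succ m =>
        simp only [List.getElem?_cons_succ] at hn
        rw [List.idxOf_cons_ne _ hx]
        exact Nat.succ_le_succ (ih m hn)

-- the two ports' dict updates are the same computation
lemma pv_dict_eq (c : String) (d : List (String × Int)) : pvDictStepA c d = pvDictStepB c d := rfl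

-- str.find for a single-character needle is the first index of that character
lemma pv_find_singleton (l : List Char) (ch : Char) :
    PySem.Chars.find l [ch] = if ch ∈ l then (l.idxOf ch : Int) else -1 := by
  by_cases h : ch ∈ l
  · have hinf : [ch] <:+: l := by
      obtain ⟨s, t, rfl⟩ := List.append_of_mem h
      exact ⟨s, t, by simp⟩
    have h0 : 0 ≤ PySem.Chars.find l [ch] := (PySem.Chars.find_nonneg_iff l [ch]).mpr hinf
    obtain ⟨hpre, hmin⟩ := PySem.Chars.find_spec h0
    set n := (PySem.Chars.find l [ch]).toNat with hn
    have hget : l[n]? = some ch := by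
      have := (pv_singleton_prefix ch (l.drop n)).mp hpre
      simpa [List.getElem?_drop] using this
    have hle : l.idxOf ch ≤ n := pv_idxOf_le ch l n hget
    have hidx : l[l.idxOf ch]? = some ch := List.getElem?_idxOf h
    have hdrop : [ch] <+: l.drop (l.idxOf ch) := by
      rw [pv_singleton_prefix]
      simpa [List.getElem?_drop] using hidx
    have hge : n ≤ l.idxOf ch := by
      rcases Nat.lt_or_ge (l.idxOf ch) n with hlt | hge2
      · exact absurd hdrop (hmin (l.idxOf ch) hlt)
      · exact hge2
    simp only [h, if_true]
    omega
  · have hni : ¬ [ch] <:+: l := fun hinf => h (hinf.subset (List.mem_singleton_self ch))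
    rw [(PySem.Chars.find_eq_neg_one_iff l [ch]).mpr hni]
    simp [h]

-- ===== VERDICT (by name: the statement is the Claim_ definition above) =====
theorem findNextSymbolPosition_spec : Claim_equal_findNextSymbolPosition := by
  intro c s d _hdom _hpre
  unfold Spec_findNextSymbolPosition findNextSymbolPosition findNextSymbolPosition_alt
  by_cases hone : ∃ ch, c.toList = [ch] ∧ ch ≠ '_'
  · obtain ⟨ch, hc, hch⟩ := hone
    have hcne : c ≠ "_" := by
      intro h
      rw [h] at hc
      simp at hc
      exact hch hc.symm
    have hguard : (PySem.Str.len c == 1 && c != "_") = true := by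
      simp [PySem.Str.len_eq, hc, hcne]
    rw [pv_stepA_main c ch hc hch]
    rw [PySem.Str.find_eq, hc, pv_find_singleton]
    simp only [hguard, if_true] at *
    by_cases hm : ch ∈ s.toList
    · have hcast : ((s.toList.idxOf ch : Int) == -1) = false := by
        simp only [beq_eq_false_iff_ne, ne_eq]
        omega
      simp only [hm, if_true, hcast, Bool.false_eq_true, if_false]
      have h1 : PySem.List.slice s.toList none (some (s.toList.idxOf ch : Int)) =
          s.toList.take (s.toList.idxOf ch) := PySem.List.slice_to_natCast _ _
      have hc1 : ((s.toList.idxOf ch : Int) + 1) = ((s.toList.idxOf ch + 1 : Nat) : Int) := by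
        push_cast; ring
      have h2 : PySem.List.slice s.toList (some ((s.toList.idxOf ch : Int) + 1)) none =
          s.toList.drop (s.toList.idxOf ch + 1) := by
        rw [hc1]; exact PySem.List.slice_from_natCast _ _
      rw [h1, h2]
      simp [pv_dict_eq]
    · simp only [hm, if_false]
      simp [String.ofList_toList, pv_dict_eq]
  · have hA : ∀ sym ∈ s.toList, sym = '_' ∨ [sym] ≠ c.toList := by
      intro sym _hs
      by_cases h1 : sym = '_'
      · exact Or.inl h1
      · refine Or.inr fun hEq => hone ⟨sym, hEq.symm, h1⟩
    have hguard : (PySem.Str.len c == 1 && c != "_") = false := by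
      rw [PySem.Str.len_eq]
      by_cases hl : c.toList.length = 1
      · obtain ⟨ch, hc⟩ := List.length_eq_one_iff.mp hl
        have hch : ch = '_' := by
          by_contra hne
          exact hone ⟨ch, hc, hne⟩
        subst hch
        have hcu : c = "_" := by
          have := congrArg String.ofList hc
          simpa [String.ofList_toList] using this
        simp [hcu]
      · have : ((c.toList.length : Int) == 1) = false := by
          simp only [beq_eq_false_iff_ne, ne_eq]
          omega
        exact Bool.and_eq_false_iff.mpr (Or.inl this)
    rw [pv_stepA_nohit c s.toList hA]
    simp only [hguard, Bool.false_eq_true, if_false]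
    simp [String.ofList_toList, pv_dict_eq]
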